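-- pv_equiv track=rewrite | github.com/5a8er/OS-Lab | srt.py | run_srt_scheduler
-- ===== SOURCE A (Python) =====
-- def run_srt_scheduler(num_processes, arrival_times, burst_times):
--     """
--     Run the SRT (Shortest Remaining Time) scheduling algorithm.
--
--     Args:
--         num_processes (int): Number of processes
--         arrival_times (list): List of process arrival times
--         burst_times (list): List of process burst times
--
--     Returns:
--         tuple: A tuple containing (gantt_chart, process_order)
--     """
--     # Create copies to avoid modifying original lists
--     remaining_times = burst_times.copy()
--     completed = [False] * num_processes
--     completed_count = 0
--     process_ids = [f"P{i+1}" for i in range(num_processes)]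
--
--     current_process = ""
--     current_time = min(arrival_times)  # Start at earliest arrival
--     start_time = current_time
--     gantt_chart = []
--
--     while completed_count < num_processes:
--         # Find ready processes
--         ready_processes = [
--             i for i in range(num_processes)
--             if not completed[i] and arrival_times[i] <= current_time
--         ]
--
--         if not ready_processes:
--             # No process is ready, advance time to next arrival
--             if current_process:
--                 gantt_chart.append((current_process, start_time, current_time))
--
--             current_process = ""
--             next_arrival = float('inf')
--             for i in range(num_processes):
--                 if not completed[i] and arrival_times[i] > current_time:
--                     next_arrival = min(next_arrival, arrival_times[i])
--
--             if next_arrival == float('inf'):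
--                 break
--             current_time = next_arrival
--             continue
--
--         # Find process with shortest remaining time
--         selected_process = -1
--         shortest_time = float('inf')
--         for proc in ready_processes:
--             if remaining_times[proc] < shortest_time:
--                 shortest_time = remaining_times[proc]
--                 selected_process = proc
--             elif remaining_times[proc] == shortest_time and arrival_times[proc] < arrival_times[selected_process]:
--                 # Break tie using arrival time
--                 selected_process = proc
--
--         # Process context switch
--         if current_process != process_ids[selected_process]:
--             if current_process:
--                 gantt_chart.append((current_process, start_time, current_time))
--             current_process = process_ids[selected_process]
--             start_time = current_time
--
--         # Execute for 1 time unit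
--         remaining_times[selected_process] -= 1
--         current_time += 1
--
--         # Check if process completed
--         if remaining_times[selected_process] == 0:
--             completed[selected_process] = True
--             completed_count += 1
--             gantt_chart.append((current_process, start_time, current_time))
--             current_process = ""
--
--     # Add final process if any
--     if current_process and start_time != current_time:
--         gantt_chart.append((current_process, start_time, current_time))
--
--     # Generate process order from gantt chart
--     process_order = [entry[0] for entry in gantt_chart]
--
--     return gantt_chart, process_order
-- ===== SOURCE B (Python) =====
-- def run_srt_scheduler(num_processes, arrival_times, burst_times):
--     """Event-driven SRT over a shrinking list of pending (arrival, remaining, index)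
--     triples: each round runs the tuple-minimal ready process in one block until it
--     finishes or the next arrival; the gantt chart is accumulated newest-first and
--     reversed at the end."""
--     pending = [(arrival_times[i], burst_times[i], i) for i in range(num_processes)]
--     t = min(arrival_times)
--     cur, start = "", t
--     rev = []
--     while pending:
--         ready = [(r, a, i) for (a, r, i) in pending if a <= t]
--         if not ready:
--             t = min(a for (a, _, _) in pending)
--             continue
--         r, a, i = min(ready)
--         pid = "P" + str(i + 1)
--         if cur != pid:
--             if cur:
--                 rev = [(cur, start, t)] + rev
--             cur, start = pid, t
--         future = [a2 for (a2, _, _) in pending if a2 > t]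
--         step = r if not future else min(r, min(future) - t)
--         t += step
--         if step == r:
--             pending = [(a2, r2, j) for (a2, r2, j) in pending if j != i]
--             rev = [(cur, start, t)] + rev
--             cur = ""
--         else:
--             pending = [(a2, r2 - step, j) if j == i else (a2, r2, j)
--                        for (a2, r2, j) in pending]
--     gantt = rev[::-1]
--     return gantt, [e[0] for e in gantt]
-- ===== Notes on version B (the rewrite author's own statement) =====
-- stated objective: alternative
-- what changed: Replaces A's per-time-unit simulation over parallel arrays (remaining/completed/ncomp plus an appended gantt list) by an event-driven loop over a single shrinking list of pending (arrival, remaining, index) triples: each round picks the tuple-minimal ready triple and runs it in one block until completion or the next arrival, finished processes are removed from the list instead of flagged, and the gantt chart is accumulated newest-first and reversed once at the end.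
import Mathlib
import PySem

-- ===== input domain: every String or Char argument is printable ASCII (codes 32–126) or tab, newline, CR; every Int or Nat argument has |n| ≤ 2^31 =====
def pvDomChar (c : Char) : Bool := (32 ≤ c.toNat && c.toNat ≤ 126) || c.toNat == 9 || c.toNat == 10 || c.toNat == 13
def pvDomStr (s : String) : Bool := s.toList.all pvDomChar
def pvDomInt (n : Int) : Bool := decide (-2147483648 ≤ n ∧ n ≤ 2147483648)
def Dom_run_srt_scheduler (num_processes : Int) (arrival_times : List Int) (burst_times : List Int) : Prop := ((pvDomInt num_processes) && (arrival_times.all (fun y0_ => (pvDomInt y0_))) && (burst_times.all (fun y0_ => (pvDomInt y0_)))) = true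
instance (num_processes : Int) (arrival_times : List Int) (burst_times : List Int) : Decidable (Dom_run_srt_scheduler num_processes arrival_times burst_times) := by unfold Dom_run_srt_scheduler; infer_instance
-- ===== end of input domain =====

-- B replaces A's per-time-unit simulation over parallel arrays by an event-driven loop over a
-- shrinking list of pending (arrival, remaining, index) triples with a reversed gantt accumulator;
-- return values proved equal on Pre_.

-- ===== PORT A =====
-- A's Python locals (remaining_times, completed, completed_count, current_process,
-- start_time, current_time, gantt_chart) as one record.
structure pvSt where
  rem : List Int
  done : List Bool
  ncomp : Int
  cur : String
  start : Int
  t : Int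
  gantt : List (String × Int × Int)
deriving Repr, DecidableEq

-- ready_processes = [i for i in range(n) if not completed[i] and arrival_times[i] <= current_time]
def pvA_ready (n : Int) (arr : List Int) (done : List Bool) (t : Int) : List Int :=
  (PySem.List.pyRange 0 n 1).filter
    (fun i => !(PySem.List.pyGetD done i false) && decide (PySem.List.pyGetD arr i 0 ≤ t))

-- one step of A's selection loop; float('inf') is ported as `none` (remaining times are ints,
-- so `rem < inf` is always true and `rem == inf` always false — exact)
def pvA_selStep (rem arr : List Int) (sp : Int × Option Int) (proc : Int) : Int × Option Int :=
  match sp.2 with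
  | none => (proc, some (PySem.List.pyGetD rem proc 0))
  | some sh =>
    if PySem.List.pyGetD rem proc 0 < sh then (proc, some (PySem.List.pyGetD rem proc 0))
    else if PySem.List.pyGetD rem proc 0 = sh ∧ PySem.List.pyGetD arr proc 0 < PySem.List.pyGetD arr sp.1 0 then
      (proc, sp.2)
    else sp

def pvA_select (rem arr : List Int) (ready : List Int) : Int × Option Int :=
  ready.foldl (pvA_selStep rem arr) (-1, none)

-- the `next_arrival = min(next_arrival, arrival_times[i])` loop; `none` = float('inf')
def pvA_nextArrival (n : Int) (arr : List Int) (done : List Bool) (t : Int) : Option Int :=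
  (PySem.List.pyRange 0 n 1).foldl
    (fun acc i =>
      if !(PySem.List.pyGetD done i false) && decide (t < PySem.List.pyGetD arr i 0) then
        match acc with
        | none => some (PySem.List.pyGetD arr i 0)
        | some v => some (min v (PySem.List.pyGetD arr i 0))
      else acc) none

-- one iteration of A's while-loop body; the Bool is True on `break`.
-- List indexing is pyGetD/pySetD (in range for every index A uses, under Pre_).
def pvA_body (n : Int) (arr : List Int) (pids : List String) (s : pvSt) : pvSt × Bool :=
  let ready := pvA_ready n arr s.done s.t
  if ready.isEmpty then
    let g1 := if s.cur ≠ "" then s.gantt ++ [(s.cur, s.start, s.t)] else s.gantt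
    match pvA_nextArrival n arr s.done s.t with
    | none => ({ s with cur := "", gantt := g1 }, true)
    | some v => ({ s with cur := "", gantt := g1, t := v }, false)
  else
    let sel := (pvA_select s.rem arr ready).1
    let pid := PySem.List.pyGetD pids sel ""
    let g1 := if s.cur ≠ pid ∧ s.cur ≠ "" then s.gantt ++ [(s.cur, s.start, s.t)] else s.gantt
    let c1 := if s.cur ≠ pid then pid else s.cur
    let st1 := if s.cur ≠ pid then s.t else s.start
    let rem1 := PySem.List.pySetD s.rem sel (PySem.List.pyGetD s.rem sel 0 - 1)
    let t1 := s.t + 1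
    if PySem.List.pyGetD rem1 sel 0 = 0 then
      ({ rem := rem1, done := PySem.List.pySetD s.done sel true, ncomp := s.ncomp + 1,
         cur := "", start := st1, t := t1, gantt := g1 ++ [(c1, st1, t1)] }, false)
    else
      ({ rem := rem1, done := s.done, ncomp := s.ncomp, cur := c1, start := st1, t := t1, gantt := g1 }, false)

def pvA_loop (n : Int) (arr : List Int) (pids : List String) : Nat → pvSt → pvSt
  | 0, s => s
  | fuel+1, s =>
    if s.ncomp < n then
      match pvA_body n arr pids s with
      | (s', true) => s'
      | (s', false) => pvA_loop n arr pids fuel s'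
    else s

def run_srt_scheduler (num_processes : Int) (arrival_times : List Int) (burst_times : List Int) : (List (String × Int × Int)) × List String :=
  let pids := (PySem.List.pyRange 0 num_processes 1).map (fun i => "P" ++ PySem.Int.toStr (i + 1))
  -- min(arrival_times): Pre_ excludes the empty list (ValueError)
  let t0 := (PySem.List.min? arrival_times (fun x => x)).getD 0
  -- fuel is a totality guard only: under Pre_ it exceeds the number of loop iterations
  let fuel := (burst_times.map Int.toNat).sum + num_processes.toNat + 1
  let fin := pvA_loop num_processes arrival_times pids fuel
      { rem := burst_times, done := List.replicate num_processes.toNat false, ncomp := 0,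
        cur := "", start := t0, t := t0, gantt := [] }
  let g := if fin.cur ≠ "" ∧ fin.start ≠ fin.t then fin.gantt ++ [(fin.cur, fin.start, fin.t)] else fin.gantt
  (g, g.map (fun e => e.1))

-- ===== PORT B =====
-- B's whole state: the pending list of (arrival, remaining, index) triples, the clock,
-- the running segment, and the gantt chart accumulated newest-first.
structure pvEvSt where
  pend : List (Int × Int × Int)
  t : Int
  cur : String
  start : Int
  rev : List (String × Int × Int)
deriving Repr, DecidableEq

-- Python's `<` on int 3-tuples (lexicographic)
def pvE_lexLt (x y : Int × Int × Int) : Bool :=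
  decide (x.1 < y.1) ||
    (x.1 == y.1 && (decide (x.2.1 < y.2.1) ||
      (x.2.1 == y.2.1 && decide (x.2.2 < y.2.2))))

-- min(list of 3-tuples): first minimum under lexicographic order (exact for Python min)
def pvE_lexmin : List (Int × Int × Int) → Option (Int × Int × Int)
  | [] => none
  | x :: l => some (l.foldl (fun m y => if pvE_lexLt y m then y else m) x)

-- one round of B's while-loop
def pvE_body (e : pvEvSt) : pvEvSt :=
  -- ready = [(r, a, i) for (a, r, i) in pending if a <= t]
  let ready := (e.pend.filter (fun p => decide (p.1 ≤ e.t))).map (fun p => (p.2.1, p.1, p.2.2))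
  if ready.isEmpty then
    -- t = min(a for (a, _, _) in pending): pending nonempty whenever reached (default unused)
    { e with t := (PySem.List.min? (e.pend.map (fun p => p.1)) (fun x => x)).getD e.t }
  else
    -- r, a, i = min(ready): ready nonempty here, so the getD default is never used
    let m := (pvE_lexmin ready).getD (0, 0, 0)
    let r := m.1
    let i := m.2.2
    let pid := "P" ++ PySem.Int.toStr (i + 1)
    let rev1 := if e.cur ≠ pid ∧ e.cur ≠ "" then (e.cur, e.start, e.t) :: e.rev else e.rev
    let c1 := if e.cur ≠ pid then pid else e.cur
    let st1 := if e.cur ≠ pid then e.t else e.start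
    -- future = [a2 for (a2, _, _) in pending if a2 > t]
    let future := (e.pend.filter (fun p => decide (e.t < p.1))).map (fun p => p.1)
    let step := if future.isEmpty then r
                else min r ((PySem.List.min? future (fun x => x)).getD 0 - e.t)
    let t1 := e.t + step
    if step = r then
      { pend := e.pend.filter (fun q => !(q.2.2 == i)), t := t1, cur := "", start := st1,
        rev := (c1, st1, t1) :: rev1 }
    else
      { pend := e.pend.map (fun q => if q.2.2 == i then (q.1, q.2.1 - step, q.2.2) else q),
        t := t1, cur := c1, start := st1, rev := rev1 }

def pvE_loop : Nat → pvEvSt → pvEvSt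
  | 0, e => e
  | fuel+1, e => if e.pend.isEmpty then e else pvE_loop fuel (pvE_body e)

def run_srt_scheduler_alt (num_processes : Int) (arrival_times : List Int) (burst_times : List Int) : (List (String × Int × Int)) × List String :=
  -- pending = [(arrival_times[i], burst_times[i], i) for i in range(num_processes)]
  let pend0 := (PySem.List.pyRange 0 num_processes 1).map
    (fun i => (PySem.List.pyGetD arrival_times i 0, PySem.List.pyGetD burst_times i 0, i))
  let t0 := (PySem.List.min? arrival_times (fun x => x)).getD 0
  -- fuel is a totality guard only: under Pre_ it exceeds the number of events
  let fuel := (burst_times.map Int.toNat).sum + num_processes.toNat + 1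
  let fin := pvE_loop fuel { pend := pend0, t := t0, cur := "", start := t0, rev := [] }
  -- gantt = rev[::-1]
  let gantt := fin.rev.reverse
  (gantt, gantt.map (fun e => e.1))

-- ===== PRECONDITION & SPEC =====
-- Pre_ excludes only inputs where A raises (ValueError: min of an empty arrival list; IndexError:
-- num_processes larger than a list) or never returns (a burst time ≤ 0 among the first
-- num_processes entries makes A's remaining time skip past 0 and the loop run forever).
def Pre_run_srt_scheduler (num_processes : Int) (arrival_times : List Int) (burst_times : List Int) : Prop :=
  arrival_times ≠ [] ∧ num_processes ≤ (arrival_times.length : Int) ∧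
  num_processes ≤ (burst_times.length : Int) ∧
  ∀ b ∈ burst_times.take num_processes.toNat, 1 ≤ b

instance (num_processes : Int) (arrival_times : List Int) (burst_times : List Int) : Decidable (Pre_run_srt_scheduler num_processes arrival_times burst_times) := by unfold Pre_run_srt_scheduler; infer_instance

def pvWitness_run_srt_scheduler : Int × List Int × List Int := (2, [0, 2], [3, 1])

def Spec_run_srt_scheduler (num_processes : Int) (arrival_times : List Int) (burst_times : List Int) (out : (List (String × Int × Int)) × List String) : Prop := out = run_srt_scheduler_alt num_processes arrival_times burst_times
instance (num_processes : Int) (arrival_times : List Int) (burst_times : List Int) (out : (List (String × Int × Int)) × List String) : Decidable (Spec_run_srt_scheduler num_processes arrival_times burst_times out) := by unfold Spec_run_srt_scheduler; infer_instance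

-- ===== CLAIM (what is proved, stated in full; the proofs are below) =====
def Claim_equal_run_srt_scheduler : Prop := ∀ (num_processes : Int) (arrival_times : List Int) (burst_times : List Int), Dom_run_srt_scheduler num_processes arrival_times burst_times → Pre_run_srt_scheduler num_processes arrival_times burst_times → Spec_run_srt_scheduler num_processes arrival_times burst_times (run_srt_scheduler num_processes arrival_times burst_times)

-- ===== LEMMAS AND PROOFS =====

-- Proof-side REFERENCE event program over A's state record: one event = run the picked
-- process for a whole block.  A is related to it by the block-vs-ticks simulation below,
-- B's port by the list-representation simulation further down.
def pvB_pick (rem arr : List Int) (ready : List Int) : Int :=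
  (PySem.List.min2? ready (fun i => PySem.List.pyGetD rem i 0) (fun i => PySem.List.pyGetD arr i 0)).getD (-1)

def pvB_future (n : Int) (arr : List Int) (done : List Bool) (t : Int) : List Int :=
  ((PySem.List.pyRange 0 n 1).filter
    (fun i => !(PySem.List.pyGetD done i false) && decide (t < PySem.List.pyGetD arr i 0))).map
    (fun i => PySem.List.pyGetD arr i 0)

def pvB_body (n : Int) (arr : List Int) (s : pvSt) : pvSt :=
  let ready := (PySem.List.pyRange 0 n 1).filter
    (fun i => !(PySem.List.pyGetD s.done i false) && decide (PySem.List.pyGetD arr i 0 ≤ s.t))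
  if ready.isEmpty then
    { s with t := (PySem.List.min? (((PySem.List.pyRange 0 n 1).filter
        (fun i => !(PySem.List.pyGetD s.done i false))).map (fun i => PySem.List.pyGetD arr i 0))
        (fun x => x)).getD s.t }
  else
    let p := pvB_pick s.rem arr ready
    let pid := "P" ++ PySem.Int.toStr (p + 1)
    let g1 := if s.cur ≠ pid ∧ s.cur ≠ "" then s.gantt ++ [(s.cur, s.start, s.t)] else s.gantt
    let c1 := if s.cur ≠ pid then pid else s.cur
    let st1 := if s.cur ≠ pid then s.t else s.start
    let future := pvB_future n arr s.done s.t
    let step := if future.isEmpty then PySem.List.pyGetD s.rem p 0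
                else min (PySem.List.pyGetD s.rem p 0) ((PySem.List.min? future (fun x => x)).getD 0 - s.t)
    let rem1 := PySem.List.pySetD s.rem p (PySem.List.pyGetD s.rem p 0 - step)
    let t1 := s.t + step
    if PySem.List.pyGetD rem1 p 0 = 0 then
      { rem := rem1, done := PySem.List.pySetD s.done p true, ncomp := s.ncomp + 1,
        cur := "", start := st1, t := t1, gantt := g1 ++ [(c1, st1, t1)] }
    else
      { rem := rem1, done := s.done, ncomp := s.ncomp, cur := c1, start := st1, t := t1, gantt := g1 }

def pvB_loop (n : Int) (arr : List Int) : Nat → pvSt → pvSt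
  | 0, s => s
  | fuel+1, s => if s.ncomp < n then pvB_loop n arr fuel (pvB_body n arr s) else s

-- "P{i+1}"
def pvPid (p : Int) : String := "P" ++ PySem.Int.toStr (p + 1)

-- pyGetD / pySetD at a nonnegative Int index
lemma pvGetD_int {α : Type} (xs : List α) (i : Int) (d : α) (h : 0 ≤ i) :
    PySem.List.pyGetD xs i d = xs.getD i.toNat d := by
  lift i to ℕ using h
  rw [PySem.List.pyGetD_natCast]
  simp

lemma pvSetD_int {α : Type} (xs : List α) (i : Int) (v : α) (h : 0 ≤ i) :
    PySem.List.pySetD xs i v = xs.set i.toNat v := by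
  lift i to ℕ using h
  rw [PySem.List.pySetD_natCast]
  simp

-- membership in the ready list
lemma pvMem_ready (n : Int) (arr : List Int) (done : List Bool) (t : Int) (i : Int) :
    i ∈ pvA_ready n arr done t ↔
      (0 ≤ i ∧ i < n ∧ done.getD i.toNat false = false ∧ arr.getD i.toNat 0 ≤ t) := by
  simp only [pvA_ready, List.mem_filter, PySem.List.mem_pyRange_one]
  constructor
  · rintro ⟨⟨h0, hn⟩, hb⟩
    rw [pvGetD_int _ _ _ h0, pvGetD_int _ _ _ h0] at hb
    simp at hb
    exact ⟨h0, hn, hb.1, hb.2⟩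
  · rintro ⟨h0, hn, hd, ha⟩
    refine ⟨⟨h0, hn⟩, ?_⟩
    rw [pvGetD_int _ _ _ h0, pvGetD_int _ _ _ h0]
    simp only [Bool.and_eq_true, Bool.not_eq_true', decide_eq_true_eq]
    exact ⟨hd, ha⟩

-- the step of min2?'s fold, named so the match reduces cleanly in proofs
def pvMinStep (k1 k2 : Int → Int) (acc : Option Int) (y : Int) : Option Int :=
  match acc with
  | none => some y
  | some m =>
    if (decide (k1 y < k1 m) || !decide (k1 m < k1 y) && decide (k2 y < k2 m)) = true
    then some y else some m

lemma pvMin2_eq_foldl (k1 k2 : Int → Int) (xs : List Int) :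
    PySem.List.min2? xs k1 k2 = xs.foldl (pvMinStep k1 k2) none := by
  simp only [PySem.List.min2?]
  apply PySem.List.foldl_congr_mem
  intro acc x _
  cases acc <;> rfl

lemma pvMinFold_ne_none (k1 k2 : Int → Int) : ∀ (l : List Int) (m : Int),
    l.foldl (pvMinStep k1 k2) (some m) ≠ none := by
  intro l
  induction l with
  | nil => simp
  | cons y l ih =>
    intro m
    simp only [List.foldl_cons, pvMinStep]
    split
    · exact ih y
    · exact ih m

-- A's selection fold computes min(ready, key=(remaining, arrival)) (first minimum)
lemma pvSelAux (rem arr : List Int) : ∀ (l : List Int) (x z : Int),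
    l.foldl (pvMinStep (fun i => PySem.List.pyGetD rem i 0) (fun i => PySem.List.pyGetD arr i 0)) (some x) = some z →
    l.foldl (pvA_selStep rem arr) (x, some (PySem.List.pyGetD rem x 0)) = (z, some (PySem.List.pyGetD rem z 0)) := by
  intro l
  induction l with
  | nil =>
    intro x z hz
    simp at hz
    simp [hz]
  | cons y l ih =>
    intro x z hz
    simp only [List.foldl_cons] at hz ⊢
    by_cases h1 : PySem.List.pyGetD rem y 0 < PySem.List.pyGetD rem x 0
    · have hA : pvA_selStep rem arr (x, some (PySem.List.pyGetD rem x 0)) y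
          = (y, some (PySem.List.pyGetD rem y 0)) := by
        simp [pvA_selStep, h1]
      have hB : pvMinStep (fun i => PySem.List.pyGetD rem i 0) (fun i => PySem.List.pyGetD arr i 0) (some x) y = some y := by
        simp [pvMinStep, h1]
      rw [hB] at hz
      rw [hA]
      exact ih y z hz
    · by_cases h2 : PySem.List.pyGetD rem y 0 = PySem.List.pyGetD rem x 0
            ∧ PySem.List.pyGetD arr y 0 < PySem.List.pyGetD arr x 0
      · have hA : pvA_selStep rem arr (x, some (PySem.List.pyGetD rem x 0)) y
            = (y, some (PySem.List.pyGetD rem y 0)) := by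
          simp [pvA_selStep, h1, h2, h2.1]
        have hB : pvMinStep (fun i => PySem.List.pyGetD rem i 0) (fun i => PySem.List.pyGetD arr i 0) (some x) y = some y := by
          simp [pvMinStep, h2.1, h2.2]
        rw [hB] at hz
        rw [hA]
        exact ih y z hz
      · have hA : pvA_selStep rem arr (x, some (PySem.List.pyGetD rem x 0)) y
            = (x, some (PySem.List.pyGetD rem x 0)) := by
          simp only [pvA_selStep]
          rw [if_neg h1, if_neg h2]
        have hB : pvMinStep (fun i => PySem.List.pyGetD rem i 0) (fun i => PySem.List.pyGetD arr i 0) (some x) y = some x := by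
          simp only [pvMinStep]
          rw [if_neg ?_]
          simp only [Bool.or_eq_true, Bool.and_eq_true, decide_eq_true_eq, Bool.not_eq_true',
            decide_eq_false_iff_not, not_or, not_and]
          refine ⟨h1, fun hnl hal => ?_⟩
          have : PySem.List.pyGetD rem y 0 = PySem.List.pyGetD rem x 0 := by omega
          exact h2 ⟨this, hal⟩
        rw [hB] at hz
        rw [hA]
        exact ih x z hz

lemma pvSelect_eq_pick (rem arr : List Int) (ready : List Int) (h : ready ≠ []) :
    (pvA_select rem arr ready).1 = pvB_pick rem arr ready := by
  match ready with
  | [] => exact absurd rfl h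
  | x :: l =>
    simp only [pvA_select, pvB_pick, pvMin2_eq_foldl, List.foldl_cons]
    have h1 : pvA_selStep rem arr (-1, none) x = (x, some (PySem.List.pyGetD rem x 0)) := by
      simp [pvA_selStep]
    have h2 : pvMinStep (fun i => PySem.List.pyGetD rem i 0) (fun i => PySem.List.pyGetD arr i 0) none x = some x := by
      simp [pvMinStep]
    rw [h1, h2]
    rcases Option.ne_none_iff_exists'.mp
      (pvMinFold_ne_none (fun i => PySem.List.pyGetD rem i 0) (fun i => PySem.List.pyGetD arr i 0) l x) with ⟨z, hz⟩
    rw [pvSelAux rem arr l x z hz, hz]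
    rfl

-- min2?'s fold returns an element whose first key is minimal
lemma pvMinFold_min (k1 k2 : Int → Int) : ∀ (l : List Int) (m z : Int),
    l.foldl (pvMinStep k1 k2) (some m) = some z →
      (z = m ∨ z ∈ l) ∧ k1 z ≤ k1 m ∧ ∀ x ∈ l, k1 z ≤ k1 x := by
  intro l
  induction l with
  | nil => intro m z hz; simp at hz; simp [hz]
  | cons y l ih =>
    intro m z hz
    simp only [List.foldl_cons, pvMinStep] at hz
    by_cases hc : (decide (k1 y < k1 m) || !decide (k1 m < k1 y) && decide (k2 y < k2 m)) = true
    · rw [if_pos hc] at hz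
      rcases ih y z hz with ⟨hmem, hle, hall⟩
      have hyx : k1 y ≤ k1 m := by
        simp only [Bool.or_eq_true, Bool.and_eq_true, decide_eq_true_eq, Bool.not_eq_true',
          decide_eq_false_iff_not] at hc
        rcases hc with h | ⟨h, _⟩
        · exact le_of_lt h
        · exact not_lt.mp h
      refine ⟨?_, le_trans hle hyx, ?_⟩
      · rcases hmem with h | h
        · exact Or.inr (by simp [h])
        · exact Or.inr (by simp [h])
      · intro x hx
        rcases List.mem_cons.mp hx with h | h
        · rw [h]; exact hle
        · exact hall x h
    · rw [if_neg hc] at hz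
      rcases ih m z hz with ⟨hmem, hle, hall⟩
      have hmy : k1 m ≤ k1 y := by
        simp only [Bool.or_eq_true, Bool.and_eq_true, decide_eq_true_eq, Bool.not_eq_true',
          decide_eq_false_iff_not, not_or, not_and] at hc
        exact not_lt.mp hc.1
      refine ⟨?_, hle, ?_⟩
      · rcases hmem with h | h
        · exact Or.inl h
        · exact Or.inr (by simp [h])
      · intro x hx
        rcases List.mem_cons.mp hx with h | h
        · rw [h]; exact le_trans hle hmy
        · exact hall x h

lemma pvPick_mem_min (rem arr : List Int) (ready : List Int) (h : ready ≠ []) :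
    pvB_pick rem arr ready ∈ ready ∧
      ∀ x ∈ ready, PySem.List.pyGetD rem (pvB_pick rem arr ready) 0 ≤ PySem.List.pyGetD rem x 0 := by
  match ready with
  | [] => exact absurd rfl h
  | y :: l =>
    simp only [pvB_pick, pvMin2_eq_foldl, List.foldl_cons]
    have h2 : pvMinStep (fun i => PySem.List.pyGetD rem i 0) (fun i => PySem.List.pyGetD arr i 0) none y = some y := by
      simp [pvMinStep]
    rw [h2]
    rcases Option.ne_none_iff_exists'.mp
      (pvMinFold_ne_none (fun i => PySem.List.pyGetD rem i 0) (fun i => PySem.List.pyGetD arr i 0) l y) with ⟨z, hz⟩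
    rcases pvMinFold_min (fun i => PySem.List.pyGetD rem i 0) (fun i => PySem.List.pyGetD arr i 0) l y z hz with ⟨hmem, hle, hall⟩
    rw [hz]
    constructor
    · rcases hmem with h | h
      · simp [h]
      · simp [h]
    · intro x hx
      rcases List.mem_cons.mp hx with h | h
      · rw [h]; simpa using hle
      · simpa using hall x h

-- min2?'s fold picks q when q's first key is strictly below every other element's
lemma pvMinFold_strict (k1 k2 : Int → Int) (q : Int) : ∀ (l : List Int) (m : Int),
    (∀ x ∈ l, x ≠ q → k1 q < k1 x) →
    (m = q ∨ (k1 q < k1 m ∧ q ∈ l)) →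
    l.foldl (pvMinStep k1 k2) (some m) = some q := by
  intro l
  induction l with
  | nil =>
    intro m _ hm
    rcases hm with h | ⟨_, h⟩
    · simp [h]
    · simp at h
  | cons y l ih =>
    intro m hstrict hm
    simp only [List.foldl_cons, pvMinStep]
    rcases hm with rfl | ⟨hlt, hq⟩
    · by_cases hy : y = m
      · subst hy
        rw [if_neg (by simp)]
        exact ih y (fun x hx h => hstrict x (List.mem_cons_of_mem _ hx) h) (Or.inl rfl)
      · have hlt := hstrict y List.mem_cons_self hy
        rw [if_neg (by simp [not_lt.mpr (le_of_lt hlt), hlt])]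
        exact ih m (fun x hx h => hstrict x (List.mem_cons_of_mem _ hx) h) (Or.inl rfl)
    · by_cases hy : y = q
      · subst hy
        rw [if_pos (by simp [hlt])]
        exact ih y (fun x hx h => hstrict x (List.mem_cons_of_mem _ hx) h) (Or.inl rfl)
      · have hq' : q ∈ l := by
          rcases List.mem_cons.mp hq with h | h
          · exact absurd h.symm hy
          · exact h
        have hylt := hstrict y List.mem_cons_self hy
        by_cases hc : (decide (k1 y < k1 m) || !decide (k1 m < k1 y) && decide (k2 y < k2 m)) = true
        · rw [if_pos hc]
          exact ih y (fun x hx h => hstrict x (List.mem_cons_of_mem _ hx) h) (Or.inr ⟨hylt, hq'⟩)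
        · rw [if_neg hc]
          exact ih m (fun x hx h => hstrict x (List.mem_cons_of_mem _ hx) h) (Or.inr ⟨hlt, hq'⟩)

lemma pvPick_strict (rem arr : List Int) (ready : List Int) (q : Int) (hq : q ∈ ready)
    (hstrict : ∀ x ∈ ready, x ≠ q → PySem.List.pyGetD rem q 0 < PySem.List.pyGetD rem x 0) :
    pvB_pick rem arr ready = q := by
  match ready with
  | [] => simp at hq
  | y :: l =>
    simp only [pvB_pick, pvMin2_eq_foldl, List.foldl_cons]
    have h2 : pvMinStep (fun i => PySem.List.pyGetD rem i 0) (fun i => PySem.List.pyGetD arr i 0) none y = some y := by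
      simp [pvMinStep]
    rw [h2]
    by_cases hy : y = q
    · subst hy
      rw [pvMinFold_strict _ _ y l y (fun x hx h => hstrict x (List.mem_cons_of_mem _ hx) h) (Or.inl rfl)]
      rfl
    · have hq' : q ∈ l := by
        rcases List.mem_cons.mp hq with h | h
        · exact absurd h.symm hy
        · exact h
      rw [pvMinFold_strict _ _ q l y (fun x hx h => hstrict x (List.mem_cons_of_mem _ hx) h)
        (Or.inr ⟨hstrict y List.mem_cons_self hy, hq'⟩)]
      rfl

-- loop invariant tying A's bookkeeping variables together
def pvInv (n : Int) (arr bur : List Int) (s : pvSt) : Prop :=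
  n.toNat ≤ s.rem.length ∧
  s.done.length = n.toNat ∧
  s.ncomp = (s.done.count true : Int) ∧
  (∀ i : Nat, i < n.toNat → s.done.getD i false = false → 1 ≤ s.rem.getD i 0) ∧
  (s.cur = "" ∨ ∃ p : Nat, p < n.toNat ∧ s.cur = pvPid p ∧ s.done.getD p false = false ∧ arr.getD p 0 ≤ s.t)

-- termination measure: total remaining work of unfinished processes + number of pending arrivals
def pvMu (n : Int) (arr : List Int) (s : pvSt) : Nat :=
  (∑ i ∈ Finset.range n.toNat, if s.done.getD i false then 0 else (s.rem.getD i 0).toNat)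
  + (∑ i ∈ Finset.range n.toNat, if s.done.getD i false = false ∧ s.t < arr.getD i 0 then 1 else 0)

lemma pvCount_set_true : ∀ (l : List Bool) (i : Nat), i < l.length → l.getD i false = false →
    (l.set i true).count true = l.count true + 1 := by
  intro l
  induction l with
  | nil => intro i h; simp at h
  | cons b l ih =>
    intro i hi hd
    cases i with
    | zero =>
      simp at hd
      simp [hd, List.count_cons]
    | succ i =>
      simp at hi hd
      simp [List.count_cons, ih i hi hd]
      omega

lemma pvGetD_set_self {α : Type} (l : List α) (i : Nat) (v d : α) (h : i < l.length) :
    (l.set i v).getD i d = v := by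
  rw [List.getD_eq_getElem _ _ (by simpa using h)]
  simp [List.getElem_set_self]

lemma pvGetD_set_ne {α : Type} (l : List α) (i j : Nat) (v d : α) (h : i ≠ j) :
    (l.set i v).getD j d = l.getD j d := by
  by_cases hj : j < l.length
  · rw [List.getD_eq_getElem _ _ (by simpa using hj), List.getD_eq_getElem _ _ hj]
    exact List.getElem_set_ne h _
  · rw [List.getD_eq_default _ _ (by simpa using hj), List.getD_eq_default _ _ (by omega)]

-- some unfinished process exists while the loop condition holds
lemma pvExists_notdone (n : Int) (arr bur : List Int) (s : pvSt)
    (hInv : pvInv n arr bur s) (hnc : s.ncomp < n) :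
    ∃ i : Nat, i < n.toNat ∧ s.done.getD i false = false := by
  obtain ⟨hr, hlen, hcount, hrem, hcur⟩ := hInv
  by_contra hall
  push_neg at hall
  have hco : s.done.count true = s.done.length := by
    rw [List.count_eq_length]
    intro b hb
    rcases List.mem_iff_getElem.mp hb with ⟨i, hi, hbi⟩
    have := hall i (by omega)
    rw [List.getD_eq_getElem _ _ hi] at this
    cases b
    · exact absurd hbi this
    · rfl
  rw [hcount, hco, hlen] at hnc
  omega

lemma pvMu_pos (n : Int) (arr bur : List Int) (s : pvSt)
    (hInv : pvInv n arr bur s) (hnc : s.ncomp < n) : 1 ≤ pvMu n arr s := by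
  obtain ⟨i, hi, hd⟩ := pvExists_notdone n arr bur s hInv hnc
  have h1 : 1 ≤ (s.rem.getD i 0).toNat := by
    have := hInv.2.2.2.1 i hi hd
    omega
  have : (if s.done.getD i false then 0 else (s.rem.getD i 0).toNat)
      ≤ ∑ j ∈ Finset.range n.toNat, (if s.done.getD j false then 0 else (s.rem.getD j 0).toNat) :=
    Finset.single_le_sum (f := fun j => if s.done.getD j false then 0 else (s.rem.getD j 0).toNat)
      (fun _ _ => Nat.zero_le _) (Finset.mem_range.mpr hi)
  rw [hd] at this
  simp only [Bool.false_eq_true, if_false] at this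
  unfold pvMu
  omega

-- A's next-arrival fold equals the reference's min over the not-yet-arrived processes
lemma pvNextArr_eq (n : Int) (arr : List Int) (done : List Bool) (t : Int) :
    pvA_nextArrival n arr done t =
      PySem.List.min? (((PySem.List.pyRange 0 n 1).filter
        (fun i => !(PySem.List.pyGetD done i false) && decide (t < PySem.List.pyGetD arr i 0))).map
        (fun i => PySem.List.pyGetD arr i 0)) (fun x => x) := by
  unfold pvA_nextArrival PySem.List.min?
  rw [PySem.List.foldl_if_eq_foldl_filter]
  rw [List.foldl_map]
  apply PySem.List.foldl_congr_mem
  intro acc x _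
  cases acc with
  | none => rfl
  | some m =>
    simp only [min_def]
    split_ifs <;> simp_all <;> omega

-- the idle branch: A and the reference both jump the clock to the earliest remaining arrival
lemma pvIdle (n : Int) (arr bur : List Int) (pids : List String) (s : pvSt)
    (hInv : pvInv n arr bur s) (hnc : s.ncomp < n)
    (hemp : pvA_ready n arr s.done s.t = []) :
    ∃ v : Int,
      pvA_body n arr pids s = ({ s with t := v }, false) ∧
      pvB_body n arr s = { s with t := v } ∧
      pvInv n arr bur { s with t := v } ∧
      pvMu n arr { s with t := v } < pvMu n arr s := by
  have hcur : s.cur = "" := by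
    rcases hInv.2.2.2.2 with h | ⟨p, hp, hpc, hpd, hpa⟩
    · exact h
    · exfalso
      have : (p : Int) ∈ pvA_ready n arr s.done s.t := by
        rw [pvMem_ready]
        refine ⟨Int.natCast_nonneg p, ?_, ?_, ?_⟩
        · omega
        · simpa using hpd
        · simpa using hpa
      rw [hemp] at this
      simp at this
  obtain ⟨j, hj, hjd⟩ := pvExists_notdone n arr bur s hInv hnc
  have hjt : s.t < arr.getD j 0 := by
    by_contra hle
    have : (j : Int) ∈ pvA_ready n arr s.done s.t := by
      rw [pvMem_ready]
      exact ⟨Int.natCast_nonneg j, by omega, by simpa using hjd, by simpa using hle⟩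
    rw [hemp] at this
    simp at this
  have hjmem : PySem.List.pyGetD arr (j : Int) 0 ∈
      ((PySem.List.pyRange 0 n 1).filter
        (fun i => !(PySem.List.pyGetD s.done i false) && decide (s.t < PySem.List.pyGetD arr i 0))).map
        (fun i => PySem.List.pyGetD arr i 0) := by
    refine List.mem_map.mpr ⟨(j : Int), List.mem_filter.mpr ⟨?_, ?_⟩, rfl⟩
    · rw [PySem.List.mem_pyRange_one]
      constructor
      · exact Int.natCast_nonneg j
      · omega
    · simp only [PySem.List.pyGetD_natCast, Bool.and_eq_true, Bool.not_eq_true',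
        decide_eq_true_eq, Int.toNat_natCast]
      constructor
      · simpa using hjd
      · simpa using hjt
  obtain ⟨v, hv⟩ : ∃ v, PySem.List.min? (((PySem.List.pyRange 0 n 1).filter
      (fun i => !(PySem.List.pyGetD s.done i false) && decide (s.t < PySem.List.pyGetD arr i 0))).map
      (fun i => PySem.List.pyGetD arr i 0)) (fun x => x) = some v := by
    rcases hx : PySem.List.min? _ (fun x => x) with _ | v
    · rw [PySem.List.min?_eq_none_iff] at hx
      rw [hx] at hjmem
      simp at hjmem
    · exact ⟨v, rfl⟩
  have hvmem := PySem.List.min?_mem hv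
  have hvmin := PySem.List.min?_isMin hv
  obtain ⟨iv, hivf, hive⟩ := List.mem_map.mp hvmem
  have hivc := List.mem_filter.mp hivf
  have hiv0 : 0 ≤ iv := ((PySem.List.mem_pyRange_one).mp hivc.1).1
  have hivn : iv < n := ((PySem.List.mem_pyRange_one).mp hivc.1).2
  have hivd : s.done.getD iv.toNat false = false := by
    have := hivc.2
    rw [pvGetD_int _ _ _ hiv0] at this
    simp at this
    exact this.1
  have hivt : s.t < arr.getD iv.toNat 0 := by
    have := hivc.2
    rw [pvGetD_int _ _ _ hiv0, pvGetD_int _ _ _ hiv0] at this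
    simp at this
    exact this.2
  have hvval : arr.getD iv.toNat 0 = v := by
    rw [← hive, pvGetD_int _ _ _ hiv0]
  have htv : s.t < v := by omega
  have hA : pvA_body n arr pids s = ({ s with t := v }, false) := by
    unfold pvA_body
    rw [hemp]
    simp only [List.isEmpty_nil, if_true]
    rw [pvNextArr_eq, hv]
    simp [hcur]
  have hB : pvB_body n arr s = { s with t := v } := by
    unfold pvB_body
    have hBr : (PySem.List.pyRange 0 n 1).filter
        (fun i => !(PySem.List.pyGetD s.done i false) && decide (PySem.List.pyGetD arr i 0 ≤ s.t))
        = pvA_ready n arr s.done s.t := rfl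
    rw [hBr, hemp]
    simp only [List.isEmpty_nil, if_true]
    have hfe : (PySem.List.pyRange 0 n 1).filter (fun i => !(PySem.List.pyGetD s.done i false))
        = (PySem.List.pyRange 0 n 1).filter
          (fun i => !(PySem.List.pyGetD s.done i false) && decide (s.t < PySem.List.pyGetD arr i 0)) := by
      apply List.filter_congr
      intro i hi
      have hi0 : 0 ≤ i := ((PySem.List.mem_pyRange_one).mp hi).1
      have hin : i < n := ((PySem.List.mem_pyRange_one).mp hi).2
      rw [pvGetD_int _ _ _ hi0]
      rcases hdi : s.done.getD i.toNat false with _ | _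
      · have hti : s.t < PySem.List.pyGetD arr i 0 := by
          by_contra hle
          have : i ∈ pvA_ready n arr s.done s.t := by
            rw [pvMem_ready]
            refine ⟨hi0, hin, hdi, ?_⟩
            rw [pvGetD_int _ _ _ hi0] at hle
            omega
          rw [hemp] at this
          simp at this
        simp [hti]
      · simp
    rw [hfe, hv]
    rfl
  refine ⟨v, hA, hB, ?_, ?_⟩
  · obtain ⟨h1, h2, h3, h4, _⟩ := hInv
    exact ⟨h1, h2, h3, h4, Or.inl hcur⟩
  · unfold pvMu
    simp only
    have hle : ∀ i ∈ Finset.range n.toNat,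
        (if s.done.getD i false = false ∧ v < arr.getD i 0 then 1 else 0)
          ≤ (if s.done.getD i false = false ∧ s.t < arr.getD i 0 then (1:ℕ) else 0) := by
      intro i _
      split_ifs with ha hb
      · rfl
      · exfalso; exact hb ⟨ha.1, by omega⟩
      · omega
      · rfl
    have hstrict : ∑ i ∈ Finset.range n.toNat,
          (if s.done.getD i false = false ∧ v < arr.getD i 0 then (1:ℕ) else 0)
        < ∑ i ∈ Finset.range n.toNat,
          (if s.done.getD i false = false ∧ s.t < arr.getD i 0 then (1:ℕ) else 0) := by
      apply Finset.sum_lt_sum hle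
      refine ⟨iv.toNat, Finset.mem_range.mpr (by omega), ?_⟩
      rw [if_neg (by rw [hvval]; omega), if_pos ⟨hivd, hivt⟩]
      omega
    omega

-- state after the running process p (initial remaining rp) has executed j time units
def pvMid (s : pvSt) (p rp j : Int) : pvSt :=
  { rem := s.rem.set p.toNat (rp - j), done := s.done, ncomp := s.ncomp,
    cur := pvPid p,
    start := if s.cur ≠ pvPid p then s.t else s.start,
    t := s.t + j,
    gantt := if s.cur ≠ pvPid p ∧ s.cur ≠ "" then s.gantt ++ [(s.cur, s.start, s.t)] else s.gantt }

-- state after the running process p completed at time s.t + δ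
def pvFin (s : pvSt) (p rp δ : Int) : pvSt :=
  { rem := s.rem.set p.toNat (rp - δ), done := s.done.set p.toNat true, ncomp := s.ncomp + 1,
    cur := "",
    start := if s.cur ≠ pvPid p then s.t else s.start,
    t := s.t + δ,
    gantt := (if s.cur ≠ pvPid p ∧ s.cur ≠ "" then s.gantt ++ [(s.cur, s.start, s.t)] else s.gantt)
             ++ [(pvPid p, if s.cur ≠ pvPid p then s.t else s.start, s.t + δ)] }

lemma pvBbody_eq (n : Int) (arr : List Int) (s : pvSt) (p rp δI : Int)
    (hp : p = pvB_pick s.rem arr (pvA_ready n arr s.done s.t))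
    (hne : pvA_ready n arr s.done s.t ≠ [])
    (hp0 : 0 ≤ p) (hplen : p.toNat < s.rem.length)
    (hrp : rp = s.rem.getD p.toNat 0)
    (hδ : δI = if (pvB_future n arr s.done s.t).isEmpty then rp
               else min rp (((PySem.List.min? (pvB_future n arr s.done s.t) (fun x => x)).getD 0) - s.t)) :
    pvB_body n arr s = if rp = δI then pvFin s p rp δI else pvMid s p rp δI := by
  have hRE : (pvA_ready n arr s.done s.t).isEmpty = false := by
    cases h : pvA_ready n arr s.done s.t
    · exact absurd h hne
    · rfl
  have hrp' : PySem.List.pyGetD s.rem p 0 = rp := by rw [pvGetD_int _ _ _ hp0, hrp]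
  have hset : PySem.List.pySetD s.rem p (rp - δI) = s.rem.set p.toNat (rp - δI) :=
    pvSetD_int _ _ _ hp0
  have hget1 : PySem.List.pyGetD (s.rem.set p.toNat (rp - δI)) p 0 = rp - δI := by
    rw [pvGetD_int _ _ _ hp0]
    exact pvGetD_set_self _ _ _ _ hplen
  have hsetd : PySem.List.pySetD s.done p true = s.done.set p.toNat true := pvSetD_int _ _ _ hp0
  have hBr : (PySem.List.pyRange 0 n 1).filter
      (fun i => !(PySem.List.pyGetD s.done i false) && decide (PySem.List.pyGetD arr i 0 ≤ s.t))
      = pvA_ready n arr s.done s.t := rfl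
  unfold pvB_body
  rw [hBr]
  simp only [hRE, Bool.false_eq_true, if_false, ← hp, hrp', ← hδ, hset, hget1, hsetd]
  by_cases hcomp : rp - δI = 0
  · rw [if_pos hcomp, if_pos (by omega : rp = δI)]
    unfold pvFin
    by_cases hc : s.cur = pvPid p
    · simp only [pvPid] at hc
      simp [hc, pvPid]
    · simp only [pvPid] at hc
      simp [hc, pvPid]
  · rw [if_neg hcomp, if_neg (by omega : ¬ rp = δI)]
    unfold pvMid
    by_cases hc : s.cur = pvPid p
    · simp only [pvPid] at hc
      simp [hc, pvPid]
    · simp only [pvPid] at hc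
      simp [hc, pvPid]

lemma pvAfirst (n : Int) (arr : List Int) (pids : List String) (s : pvSt) (p rp : Int)
    (hp : p = pvB_pick s.rem arr (pvA_ready n arr s.done s.t))
    (hne : pvA_ready n arr s.done s.t ≠ [])
    (hp0 : 0 ≤ p) (hplen : p.toNat < s.rem.length)
    (hrp : rp = s.rem.getD p.toNat 0)
    (hpid : PySem.List.pyGetD pids p "" = pvPid p) :
    pvA_body n arr pids s = (if rp = 1 then pvFin s p rp 1 else pvMid s p rp 1, false) := by
  have hRE : (pvA_ready n arr s.done s.t).isEmpty = false := by
    cases h : pvA_ready n arr s.done s.t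
    · exact absurd h hne
    · rfl
  have hsel : (pvA_select s.rem arr (pvA_ready n arr s.done s.t)).1 = p := by
    rw [pvSelect_eq_pick s.rem arr _ hne, ← hp]
  have hrp' : PySem.List.pyGetD s.rem p 0 = rp := by rw [pvGetD_int _ _ _ hp0, hrp]
  have hset : PySem.List.pySetD s.rem p (rp - 1) = s.rem.set p.toNat (rp - 1) :=
    pvSetD_int _ _ _ hp0
  have hget1 : PySem.List.pyGetD (s.rem.set p.toNat (rp - 1)) p 0 = rp - 1 := by
    rw [pvGetD_int _ _ _ hp0]
    exact pvGetD_set_self _ _ _ _ hplen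
  have hsetd : PySem.List.pySetD s.done p true = s.done.set p.toNat true := pvSetD_int _ _ _ hp0
  unfold pvA_body
  simp only [hRE, Bool.false_eq_true, if_false, hsel, hpid, hrp', hset, hget1, hsetd]
  by_cases hcomp : rp - 1 = 0
  · rw [if_pos hcomp, if_pos (by omega : rp = 1)]
    unfold pvFin
    by_cases hc : s.cur = pvPid p
    · simp only [pvPid] at hc
      simp [hc, pvPid]
    · simp only [pvPid] at hc
      simp [hc, pvPid]
  · rw [if_neg hcomp, if_neg (by omega : ¬ rp = 1)]
    unfold pvMid
    by_cases hc : s.cur = pvPid p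
    · simp only [pvPid] at hc
      simp [hc, pvPid]
    · simp only [pvPid] at hc
      simp [hc, pvPid]

lemma pvAtick (n : Int) (arr : List Int) (pids : List String) (s : pvSt) (p rp j : Int)
    (hne : pvA_ready n arr s.done s.t ≠ [])
    (hready : pvA_ready n arr s.done (s.t + j) = pvA_ready n arr s.done s.t)
    (hpR : p ∈ pvA_ready n arr s.done s.t)
    (hmin : ∀ x ∈ pvA_ready n arr s.done s.t, x ≠ p → rp ≤ s.rem.getD x.toNat 0)
    (hp0 : 0 ≤ p) (hplen : p.toNat < s.rem.length)
    (hj : 1 ≤ j)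
    (hpid : PySem.List.pyGetD pids p "" = pvPid p) :
    pvA_body n arr pids (pvMid s p rp j) =
      (if rp = j + 1 then pvFin s p rp (j + 1) else pvMid s p rp (j + 1), false) := by
  have hdone : (pvMid s p rp j).done = s.done := rfl
  have ht : (pvMid s p rp j).t = s.t + j := rfl
  have hrem : (pvMid s p rp j).rem = s.rem.set p.toNat (rp - j) := rfl
  have hRE : (pvA_ready n arr s.done s.t).isEmpty = false := by
    cases h : pvA_ready n arr s.done s.t
    · exact absurd h hne
    · rfl
  have hsel : (pvA_select (s.rem.set p.toNat (rp - j)) arr (pvA_ready n arr s.done s.t)).1 = p := by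
    rw [pvSelect_eq_pick _ arr _ hne]
    apply pvPick_strict _ arr _ p hpR
    intro x hx hxp
    have hx0 : 0 ≤ x := ((pvMem_ready n arr s.done s.t x).mp hx).1
    have hxt : x.toNat ≠ p.toNat := by omega
    rw [pvGetD_int _ _ _ hp0, pvGetD_int _ _ _ hx0,
      pvGetD_set_self _ _ _ _ hplen, pvGetD_set_ne _ _ _ _ _ (fun h => hxt h.symm)]
    have := hmin x hx hxp
    omega
  have hget0 : PySem.List.pyGetD (s.rem.set p.toNat (rp - j)) p 0 = rp - j := by
    rw [pvGetD_int _ _ _ hp0]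
    exact pvGetD_set_self _ _ _ _ hplen
  have hset : PySem.List.pySetD (s.rem.set p.toNat (rp - j)) p (rp - j - 1)
      = s.rem.set p.toNat (rp - (j + 1)) := by
    rw [pvSetD_int _ _ _ hp0, List.set_set]
    congr 1
    ring
  have hget1 : PySem.List.pyGetD (s.rem.set p.toNat (rp - (j + 1))) p 0 = rp - (j + 1) := by
    rw [pvGetD_int _ _ _ hp0]
    exact pvGetD_set_self _ _ _ _ hplen
  have hsetd : PySem.List.pySetD s.done p true = s.done.set p.toNat true := pvSetD_int _ _ _ hp0
  have hcur : (pvMid s p rp j).cur = pvPid p := rfl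
  unfold pvA_body
  rw [hdone, ht, hrem, hready]
  simp only [hRE, Bool.false_eq_true, if_false, hsel, hpid, hcur, hget0, hset, hget1, hsetd,
    ne_eq, not_true_eq_false, false_and, if_false, ite_self]
  by_cases hcomp : rp - (j + 1) = 0
  · rw [if_pos hcomp, if_pos (by omega : rp = j + 1)]
    unfold pvFin
    simp only [pvMid, add_assoc]
  · rw [if_neg hcomp, if_neg (by omega : ¬ rp = j + 1)]
    unfold pvMid
    simp only [add_assoc]

lemma pvFuture_mem (n : Int) (arr : List Int) (done : List Bool) (t : Int) (x : Int) :
    x ∈ pvB_future n arr done t ↔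
      ∃ i : Nat, i < n.toNat ∧ done.getD i false = false ∧ t < arr.getD i 0 ∧ arr.getD i 0 = x := by
  unfold pvB_future
  simp only [List.mem_map, List.mem_filter, PySem.List.mem_pyRange_one]
  constructor
  · rintro ⟨i, ⟨⟨hi0, hin⟩, hc⟩, hx⟩
    rw [pvGetD_int _ _ _ hi0, pvGetD_int _ _ _ hi0] at hc
    rw [pvGetD_int _ _ _ hi0] at hx
    simp only [Bool.and_eq_true, Bool.not_eq_true', decide_eq_true_eq] at hc
    exact ⟨i.toNat, by omega, hc.1, hc.2, hx⟩
  · rintro ⟨i, hin, hd, ht, hx⟩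
    refine ⟨(i : Int), ⟨⟨Int.natCast_nonneg i, by omega⟩, ?_⟩, ?_⟩
    · simp only [PySem.List.pyGetD_natCast, Bool.and_eq_true, Bool.not_eq_true',
        decide_eq_true_eq, Int.toNat_natCast]
      constructor
      · simpa using hd
      · simpa using ht
    · simp only [PySem.List.pyGetD_natCast, Int.toNat_natCast]
      simpa using hx

-- the busy case: one event of the reference equals δ consecutive iterations of A
lemma pvBusy (n : Int) (arr bur : List Int) (pids : List String)
    (hpids : pids = (PySem.List.pyRange 0 n 1).map (fun i => "P" ++ PySem.Int.toStr (i + 1)))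
    (s : pvSt) (hInv : pvInv n arr bur s) (hnc : s.ncomp < n)
    (hne : pvA_ready n arr s.done s.t ≠ []) :
    ∃ δ : Nat, 1 ≤ δ ∧
      pvInv n arr bur (pvB_body n arr s) ∧
      pvMu n arr (pvB_body n arr s) + δ ≤ pvMu n arr s ∧
      ∀ f : Nat, pvA_loop n arr pids (f + δ) s = pvA_loop n arr pids f (pvB_body n arr s) := by
  obtain ⟨hrlen, hdlen, hcount, hrem1, hcurinv⟩ := hInv
  obtain ⟨hpmem, hpmin⟩ := pvPick_mem_min s.rem arr _ hne
  set p := pvB_pick s.rem arr (pvA_ready n arr s.done s.t) with hp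
  obtain ⟨hp0, hpn, hpd, hpa⟩ := (pvMem_ready n arr s.done s.t p).mp hpmem
  have hplen : p.toNat < s.rem.length := by omega
  have hpdlen : p.toNat < s.done.length := by omega
  set rp := s.rem.getD p.toNat 0 with hrp
  have hrpge : 1 ≤ rp := hrem1 p.toNat (by omega) hpd
  set δI : Int := if (pvB_future n arr s.done s.t).isEmpty then rp
      else min rp (((PySem.List.min? (pvB_future n arr s.done s.t) (fun x => x)).getD 0) - s.t) with hδ
  have hfut : ∀ i : Nat, i < n.toNat → s.done.getD i false = false → s.t < arr.getD i 0 →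
      s.t + δI ≤ arr.getD i 0 := by
    intro i hi hd ht
    have hmem : arr.getD i 0 ∈ pvB_future n arr s.done s.t :=
      (pvFuture_mem n arr s.done s.t _).mpr ⟨i, hi, hd, ht, rfl⟩
    have hNE : (pvB_future n arr s.done s.t).isEmpty = false := by
      cases h : pvB_future n arr s.done s.t
      · rw [h] at hmem; simp at hmem
      · rfl
    rcases hm : PySem.List.min? (pvB_future n arr s.done s.t) (fun x => x) with _ | mf
    · rw [PySem.List.min?_eq_none_iff] at hm
      rw [hm] at hmem; simp at hmem
    · have hmle := PySem.List.min?_isMin hm _ hmem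
      rw [hδ, if_neg (by simp [hNE]), hm]
      simp only [Option.getD_some]
      have h2 : min rp (mf - s.t) ≤ mf - s.t := min_le_right _ _
      simp only at hmle
      omega
  have hδ1 : 1 ≤ δI := by
    rcases hfe : (pvB_future n arr s.done s.t).isEmpty with _ | _
    · have hfne : pvB_future n arr s.done s.t ≠ [] := by
        intro h; rw [h] at hfe; simp at hfe
      rcases hm : PySem.List.min? (pvB_future n arr s.done s.t) (fun x => x) with _ | mf
      · rw [PySem.List.min?_eq_none_iff] at hm; exact absurd hm hfne
      · have hmem := PySem.List.min?_mem hm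
        obtain ⟨i, _, _, hti, hx⟩ := (pvFuture_mem n arr s.done s.t mf).mp hmem
        rw [hδ, if_neg (by simp [hfe]), hm]
        simp only [Option.getD_some, le_min_iff]
        omega
    · rw [hδ, if_pos (by simp [hfe])]
      exact hrpge
  have hδrp : δI ≤ rp := by
    rw [hδ]
    split_ifs
    · exact le_refl _
    · exact min_le_left _ _
  have hready_shift : ∀ j : Int, 0 ≤ j → j < δI →
      pvA_ready n arr s.done (s.t + j) = pvA_ready n arr s.done s.t := by
    intro j hj0 hjδ
    unfold pvA_ready
    apply List.filter_congr
    intro i hi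
    have hi0 : 0 ≤ i := ((PySem.List.mem_pyRange_one).mp hi).1
    have hin : i < n := ((PySem.List.mem_pyRange_one).mp hi).2
    rw [pvGetD_int _ _ _ hi0, pvGetD_int _ _ _ hi0]
    rcases hdi : s.done.getD i.toNat false with _ | _
    · simp only [Bool.not_false, Bool.true_and]
      by_cases hta : arr.getD i.toNat 0 ≤ s.t
      · exact decide_eq_decide.mpr (by omega)
      · have h2 := hfut i.toNat (by omega) hdi (by omega)
        exact decide_eq_decide.mpr (by omega)
    · rfl
  have hpid : PySem.List.pyGetD pids p "" = pvPid p := by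
    rw [hpids, PySem.List.pyGetD_map_pyRange_of_nonneg _ _ _ _ hp0 hpn]
    rfl
  have hBend := pvBbody_eq n arr s p rp δI hp hne hp0 hplen hrp hδ
  have hminx : ∀ x ∈ pvA_ready n arr s.done s.t, x ≠ p → rp ≤ s.rem.getD x.toNat 0 := by
    intro x hx _
    have hx0 : 0 ≤ x := ((pvMem_ready n arr s.done s.t x).mp hx).1
    have h1 := hpmin x hx
    rw [pvGetD_int _ _ _ hp0, pvGetD_int _ _ _ hx0] at h1
    omega
  set G : Int → pvSt := fun j => if j = δI then pvB_body n arr s else pvMid s p rp j with hG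
  have hG1 : ∀ j : Int, j = δI → G j = pvB_body n arr s := by
    intro j hj
    rw [hG]
    simp [hj]
  have hG2 : ∀ j : Int, j ≠ δI → G j = pvMid s p rp j := by
    intro j hj
    rw [hG]
    simp [hj]
  have hfirstG : pvA_body n arr pids s = (G 1, false) := by
    rw [pvAfirst n arr pids s p rp hp hne hp0 hplen hrp hpid]
    by_cases h1 : (1 : Int) = δI
    · rw [hG1 1 h1, hBend, ← h1]
    · rw [hG2 1 (fun h => h1 h)]
      have hrp1 : ¬ rp = 1 := by omega
      rw [if_neg hrp1]
  have hstepG : ∀ j : Int, 1 ≤ j → j < δI →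
      pvA_body n arr pids (G j) = (G (j + 1), false) := by
    intro j hj1 hjδ
    rw [hG2 j (by omega),
      pvAtick n arr pids s p rp j hne (hready_shift j (by omega) hjδ) hpmem hminx hp0 hplen hj1 hpid]
    by_cases h1 : j + 1 = δI
    · rw [hG1 _ h1, hBend, ← h1]
    · rw [hG2 _ h1]
      have hrpj : ¬ rp = j + 1 := by omega
      rw [if_neg hrpj]
  have hGnc : ∀ j : Int, 1 ≤ j → j < δI → (G j).ncomp = s.ncomp := by
    intro j hj1 hjδ
    rw [hG2 j (by omega)]
    rfl
  have chain : ∀ (k : Nat) (j : Int), 1 ≤ j → j + (k : Int) = δI → ∀ f : Nat,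
      pvA_loop n arr pids (f + k) (G j) = pvA_loop n arr pids f (pvB_body n arr s) := by
    intro k
    induction k with
    | zero =>
      intro j hj1 hjk f
      have hjδ : j = δI := by simpa using hjk
      rw [hG1 j hjδ]
      rfl
    | succ k ih =>
      intro j hj1 hjk f
      have hjδ : j < δI := by push_cast at hjk; omega
      have hadd : f + (k + 1) = (f + k) + 1 := rfl
      rw [hadd]
      have hnck : (G j).ncomp < n := by rw [hGnc j hj1 hjδ]; exact hnc
      simp only [pvA_loop]
      rw [if_pos hnck, hstepG j hj1 hjδ]
      exact ih (j + 1) (by omega) (by push_cast at hjk ⊢; omega) f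
  have hAchain : ∀ f : Nat, pvA_loop n arr pids (f + δI.toNat) s
      = pvA_loop n arr pids f (pvB_body n arr s) := by
    intro f
    have hsplit : f + δI.toNat = (f + (δI.toNat - 1)) + 1 := by omega
    rw [hsplit]
    simp only [pvA_loop]
    rw [if_pos hnc, hfirstG]
    exact chain (δI.toNat - 1) 1 (by omega) (by push_cast; omega) f
  refine ⟨δI.toNat, by omega, ?_, ?_, hAchain⟩
  · rw [hBend]
    by_cases hc : rp = δI
    · rw [if_pos hc]
      unfold pvFin
      refine ⟨by rw [List.length_set]; exact hrlen, by rw [List.length_set]; exact hdlen, ?_, ?_, Or.inl rfl⟩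
      · simp only
        rw [pvCount_set_true s.done p.toNat hpdlen hpd, hcount]
        push_cast
        ring
      · intro i hi hdi
        simp only at hdi ⊢
        by_cases hip : i = p.toNat
        · rw [hip, pvGetD_set_self _ _ _ _ hpdlen] at hdi
          simp at hdi
        · rw [pvGetD_set_ne _ _ _ _ _ (fun h => hip h.symm)] at hdi
          rw [pvGetD_set_ne _ _ _ _ _ (fun h => hip h.symm)]
          exact hrem1 i hi hdi
    · rw [if_neg hc]
      have hδlt : δI < rp := by omega
      unfold pvMid
      refine ⟨by rw [List.length_set]; exact hrlen, hdlen, hcount, ?_, ?_⟩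
      · intro i hi hdi
        simp only at hdi ⊢
        by_cases hip : i = p.toNat
        · rw [hip, pvGetD_set_self _ _ _ _ hplen]
          omega
        · rw [pvGetD_set_ne _ _ _ _ _ (fun h => hip h.symm)]
          exact hrem1 i hi hdi
      · refine Or.inr ⟨p.toNat, by omega, ?_, hpd, by simp only; omega⟩
        simp only
        congr 1
        omega
  · have hμ2 : (∑ i ∈ Finset.range n.toNat,
          if (pvB_body n arr s).done.getD i false = false ∧ (pvB_body n arr s).t < arr.getD i 0 then (1:ℕ) else 0)
        ≤ ∑ i ∈ Finset.range n.toNat,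
          if s.done.getD i false = false ∧ s.t < arr.getD i 0 then (1:ℕ) else 0 := by
      apply Finset.sum_le_sum
      intro i hi
      have hts : (pvB_body n arr s).t = s.t + δI := by
        rw [hBend]; split_ifs <;> rfl
      split_ifs with h1 h2
      · rfl
      · exfalso
        apply h2
        rw [hts] at h1
        refine ⟨?_, by omega⟩
        rcases h1 with ⟨hd1, _⟩
        rw [hBend] at hd1
        by_cases hc : rp = δI
        · rw [if_pos hc] at hd1
          simp only [pvFin] at hd1
          by_cases hip : i = p.toNat
          · rw [hip, pvGetD_set_self _ _ _ _ hpdlen] at hd1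
            simp at hd1
          · rw [pvGetD_set_ne _ _ _ _ _ (fun h => hip h.symm)] at hd1
            exact hd1
        · rw [if_neg hc] at hd1
          exact hd1
      · exact Nat.zero_le _
      · rfl
    have hPmem : p.toNat ∈ Finset.range n.toNat := Finset.mem_range.mpr (by omega)
    have hμ1 : (∑ i ∈ Finset.range n.toNat,
          if (pvB_body n arr s).done.getD i false then 0 else ((pvB_body n arr s).rem.getD i 0).toNat) + δI.toNat
        ≤ ∑ i ∈ Finset.range n.toNat, if s.done.getD i false then 0 else (s.rem.getD i 0).toNat := by
      rw [← Finset.add_sum_erase _ _ hPmem, ← Finset.add_sum_erase _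
        (fun i => if s.done.getD i false then 0 else (s.rem.getD i 0).toNat) hPmem]
      have hrest : (∑ i ∈ (Finset.range n.toNat).erase p.toNat,
            if (pvB_body n arr s).done.getD i false then 0 else ((pvB_body n arr s).rem.getD i 0).toNat)
          = ∑ i ∈ (Finset.range n.toNat).erase p.toNat,
            if s.done.getD i false then 0 else (s.rem.getD i 0).toNat := by
        apply Finset.sum_congr rfl
        intro i hi
        have hip : i ≠ p.toNat := (Finset.mem_erase.mp hi).1
        have hd : (pvB_body n arr s).done.getD i false = s.done.getD i false := by
          rw [hBend]; split_ifs
          · exact pvGetD_set_ne _ _ _ _ _ (fun h => hip h.symm)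
          · rfl
        have hr : (pvB_body n arr s).rem.getD i 0 = s.rem.getD i 0 := by
          rw [hBend]; split_ifs <;> exact pvGetD_set_ne _ _ _ _ _ (fun h => hip h.symm)
        rw [hd, hr]
      rw [hrest]
      have hpterm : (if s.done.getD p.toNat false then 0 else (s.rem.getD p.toNat 0).toNat) = rp.toNat := by
        rw [hpd]
        simp [hrp]
      rw [hpterm]
      have hafter : (if (pvB_body n arr s).done.getD p.toNat false then 0
          else ((pvB_body n arr s).rem.getD p.toNat 0).toNat) + δI.toNat ≤ rp.toNat := by
        rw [hBend]
        by_cases hc : rp = δI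
        · rw [if_pos hc]
          simp only [pvFin]
          rw [pvGetD_set_self _ _ _ _ hpdlen]
          simp only [if_true]
          omega
        · rw [if_neg hc]
          simp only [pvMid]
          rw [hpd, pvGetD_set_self _ _ _ _ hplen]
          simp only [Bool.false_eq_true, if_false]
          omega
      omega
    unfold pvMu
    omega

-- the main simulation lemma: with enough fuel A's loop reaches the reference's final state
lemma pvMain (n : Int) (arr bur : List Int) (pids : List String)
    (hpids : pids = (PySem.List.pyRange 0 n 1).map (fun i => "P" ++ PySem.Int.toStr (i + 1))) :
    ∀ (μb : Nat) (s : pvSt) (fA fB : Nat), pvInv n arr bur s → pvMu n arr s ≤ μb →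
      pvMu n arr s < fA → pvMu n arr s < fB →
      pvA_loop n arr pids fA s = pvB_loop n arr fB s ∧
      pvInv n arr bur (pvB_loop n arr fB s) ∧ ¬ ((pvB_loop n arr fB s).ncomp < n) := by
  intro μb
  induction μb with
  | zero =>
    intro s fA fB hInv hμ hfA hfB
    have hnc : ¬ (s.ncomp < n) := fun h => by
      have := pvMu_pos n arr bur s hInv h
      omega
    obtain ⟨fA', rfl⟩ : ∃ k, fA = k + 1 := ⟨fA - 1, by omega⟩
    obtain ⟨fB', rfl⟩ : ∃ k, fB = k + 1 := ⟨fB - 1, by omega⟩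
    simp only [pvA_loop, pvB_loop, if_neg hnc]
    exact ⟨trivial, hInv, hnc⟩
  | succ μb ih =>
    intro s fA fB hInv hμ hfA hfB
    by_cases hnc : s.ncomp < n
    · by_cases hemp : pvA_ready n arr s.done s.t = []
      · obtain ⟨v, hA, hB, hInv', hμ'⟩ := pvIdle n arr bur pids s hInv hnc hemp
        obtain ⟨fA', rfl⟩ : ∃ k, fA = k + 1 := ⟨fA - 1, by omega⟩
        obtain ⟨fB', rfl⟩ : ∃ k, fB = k + 1 := ⟨fB - 1, by omega⟩
        simp only [pvA_loop, pvB_loop, if_pos hnc]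
        rw [hA, hB]
        exact ih { s with t := v } fA' fB' hInv' (by omega) (by omega) (by omega)
      · obtain ⟨δ, hδ1, hInv', hμ', hchain⟩ := pvBusy n arr bur pids hpids s hInv hnc hemp
        obtain ⟨fB', rfl⟩ : ∃ k, fB = k + 1 := ⟨fB - 1, by omega⟩
        have hfAs : fA = (fA - δ) + δ := by omega
        rw [hfAs, hchain (fA - δ)]
        simp only [pvB_loop, if_pos hnc]
        exact ih (pvB_body n arr s) (fA - δ) fB' hInv' (by omega) (by omega) (by omega)
    · obtain ⟨fA', rfl⟩ : ∃ k, fA = k + 1 := ⟨fA - 1, by omega⟩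
      obtain ⟨fB', rfl⟩ : ∃ k, fB = k + 1 := ⟨fB - 1, by omega⟩
      simp only [pvA_loop, pvB_loop, if_neg hnc]
      exact ⟨trivial, hInv, hnc⟩

lemma pvSumGetD : ∀ (l : List Int),
    ∑ i ∈ Finset.range l.length, (l.getD i 0).toNat = (l.map Int.toNat).sum := by
  intro l
  induction l with
  | nil => simp
  | cons a l ih =>
    simp only [List.length_cons, List.map_cons, List.sum_cons]
    rw [Finset.sum_range_succ']
    simp only [List.getD_cons_succ, List.getD_cons_zero]
    rw [ih]
    ring


-- ===== list-representation simulation: B's pending-triple state vs the reference state =====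

-- the triple B keeps for process i
def pvTrip (rem arr : List Int) (i : Int) : Int × Int × Int :=
  (PySem.List.pyGetD rem i 0, PySem.List.pyGetD arr i 0, i)

-- the pending list that represents (rem, done)
def pvPendOf (n : Int) (arr rem : List Int) (done : List Bool) : List (Int × Int × Int) :=
  (PySem.List.pyRange 0 n 1).filterMap
    (fun i => if PySem.List.pyGetD done i false then none
              else some (PySem.List.pyGetD arr i 0, PySem.List.pyGetD rem i 0, i))

-- coupling relation between the reference state and B's state
def pvRel (n : Int) (arr : List Int) (s : pvSt) (e : pvEvSt) : Prop :=
  e.pend = pvPendOf n arr s.rem s.done ∧ e.t = s.t ∧ e.cur = s.cur ∧ e.start = s.start ∧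
  e.rev = s.gantt.reverse

-- filtering the pending list on the arrival and projecting = filtering the index range
lemma pvPend_proj {gm : Type} (arr rem : List Int) (done : List Bool) (q : Int → Bool)
    (g : Int × Int × Int → gm) : ∀ l : List Int,
    ((l.filterMap (fun i => if PySem.List.pyGetD done i false then none
        else some (PySem.List.pyGetD arr i 0, PySem.List.pyGetD rem i 0, i))).filter
      (fun p => q p.1)).map g
    = (l.filter (fun i => !(PySem.List.pyGetD done i false) && q (PySem.List.pyGetD arr i 0))).map
        (fun i => g (PySem.List.pyGetD arr i 0, PySem.List.pyGetD rem i 0, i)) := by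
  intro l
  induction l with
  | nil => rfl
  | cons x l ih =>
    simp only [List.filterMap_cons, List.filter_cons]
    rcases hdx : PySem.List.pyGetD done x false with _ | _
    · simp only [if_neg (by simp [hdx] : ¬ (PySem.List.pyGetD done x false = true)),
        Bool.not_false, Bool.true_and]
      rcases hq : q (PySem.List.pyGetD arr x 0) with _ | _
      · simpa [List.filter_cons, hq] using ih
      · simpa [List.filter_cons, hq] using ih
    · simpa [hdx] using ih

-- the arrivals of the pending list
lemma pvPend_fst (n : Int) (arr rem : List Int) (done : List Bool) :
    (pvPendOf n arr rem done).map (fun p => p.1)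
      = ((PySem.List.pyRange 0 n 1).filter (fun i => !(PySem.List.pyGetD done i false))).map
          (fun i => PySem.List.pyGetD arr i 0) := by
  have h := pvPend_proj arr rem done (fun _ => true) (fun p => p.1) (PySem.List.pyRange 0 n 1)
  unfold pvPendOf
  simpa using h

-- initially nothing is completed, so the representation is a plain map
lemma pvPend_init (n : Int) (arr bur : List Int) :
    (PySem.List.pyRange 0 n 1).map
        (fun i => (PySem.List.pyGetD arr i 0, PySem.List.pyGetD bur i 0, i))
      = pvPendOf n arr bur (List.replicate n.toNat false) := by
  unfold pvPendOf
  have h : ∀ i ∈ PySem.List.pyRange 0 n 1,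
      (if PySem.List.pyGetD (List.replicate n.toNat false) i false then none
        else some (PySem.List.pyGetD arr i 0, PySem.List.pyGetD bur i 0, i))
      = (some ∘ fun i => (PySem.List.pyGetD arr i 0, PySem.List.pyGetD bur i 0, i)) i := by
    intro i hi
    have hi0 : 0 ≤ i := ((PySem.List.mem_pyRange_one).mp hi).1
    have hd : PySem.List.pyGetD (List.replicate n.toNat false) i false = false := by
      rw [pvGetD_int _ _ _ hi0]
      by_cases hlt : i.toNat < n.toNat
      · rw [List.getD_eq_getElem _ _ (by simpa using hlt)]
        simp
      · rw [List.getD_eq_default _ _ (by simp only [List.length_replicate]; omega)]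
    simp [hd]
  rw [List.filterMap_congr h, List.filterMap_eq_map]

-- the loop guards agree: pending nonempty iff not everything is completed
lemma pvPend_ne_nil_iff (n : Int) (arr bur : List Int) (s : pvSt) (hInv : pvInv n arr bur s) :
    pvPendOf n arr s.rem s.done ≠ [] ↔ s.ncomp < n := by
  have hdlen := hInv.2.1
  have hcount := hInv.2.2.1
  constructor
  · intro hne
    rcases List.exists_mem_of_ne_nil _ hne with ⟨x, hx⟩
    rcases List.mem_filterMap.mp hx with ⟨i, hi, hfi⟩
    have hi0 : 0 ≤ i := ((PySem.List.mem_pyRange_one).mp hi).1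
    have hin : i < n := ((PySem.List.mem_pyRange_one).mp hi).2
    have hd : s.done.getD i.toNat false = false := by
      by_contra hdt
      rw [pvGetD_int _ _ _ hi0] at hfi
      simp only [Bool.not_eq_false] at hdt
      rw [if_pos hdt] at hfi
      simp at hfi
    have hlt : i.toNat < s.done.length := by omega
    have hmem : (false : Bool) ∈ s.done := by
      have := List.getD_eq_getElem s.done false hlt
      rw [this] at hd
      rw [← hd]
      exact List.getElem_mem _
    have hcne : s.done.count true ≠ s.done.length := by
      intro h
      have := List.count_eq_length.mp h _ hmem
      simp at this
    have hcle : s.done.count true ≤ s.done.length := List.count_le_length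
    omega
  · intro hnc
    obtain ⟨i, hi, hd⟩ := pvExists_notdone n arr bur s hInv hnc
    intro hnil
    have hmem : (i : Int) ∈ PySem.List.pyRange 0 n 1 := by
      rw [PySem.List.mem_pyRange_one]
      exact ⟨Int.natCast_nonneg i, by omega⟩
    have := (List.filterMap_eq_nil_iff.mp hnil) _ hmem
    rw [pvGetD_int _ _ _ (Int.natCast_nonneg i)] at this
    simp only [Int.toNat_natCast] at this
    have hlen : i < s.done.length := by omega
    rw [List.getD_eq_getElem _ _ hlen] at hd
    simp [List.getElem?_eq_getElem hlen, hd] at this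

-- B's tuple-min fold follows the reference (remaining, arrival) min fold on an
-- index-increasing list (the index component then never decides a comparison)
lemma pvLexAux (rem arr : List Int) : ∀ (l : List Int) (m z : Int),
    (∀ x ∈ l, m < x) → l.Pairwise (· < ·) →
    l.foldl (pvMinStep (fun i => PySem.List.pyGetD rem i 0) (fun i => PySem.List.pyGetD arr i 0)) (some m) = some z →
    (l.map (pvTrip rem arr)).foldl (fun c y => if pvE_lexLt y c then y else c) (pvTrip rem arr m)
      = pvTrip rem arr z := by
  intro l
  induction l with
  | nil =>
    intro m z _ _ hz
    simp at hz
    simp [hz]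
  | cons y l ih =>
    intro m z hm hpw hz
    have hmy : m < y := hm y List.mem_cons_self
    have hcond : pvE_lexLt (pvTrip rem arr y) (pvTrip rem arr m)
        = (decide (PySem.List.pyGetD rem y 0 < PySem.List.pyGetD rem m 0) ||
            !decide (PySem.List.pyGetD rem m 0 < PySem.List.pyGetD rem y 0) &&
              decide (PySem.List.pyGetD arr y 0 < PySem.List.pyGetD arr m 0)) := by
      simp only [pvE_lexLt, pvTrip]
      apply Bool.eq_iff_iff.mpr
      simp only [Bool.or_eq_true, Bool.and_eq_true, decide_eq_true_eq, beq_iff_eq,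
        Bool.not_eq_true', decide_eq_false_iff_not]
      omega
    simp only [List.foldl_cons, pvMinStep] at hz
    simp only [List.map_cons, List.foldl_cons, hcond]
    by_cases hc : (decide (PySem.List.pyGetD rem y 0 < PySem.List.pyGetD rem m 0) ||
        !decide (PySem.List.pyGetD rem m 0 < PySem.List.pyGetD rem y 0) &&
          decide (PySem.List.pyGetD arr y 0 < PySem.List.pyGetD arr m 0)) = true
    · rw [if_pos hc]
      rw [if_pos hc] at hz
      exact ih y z (fun x hx => (List.pairwise_cons.mp hpw).1 x hx) (List.pairwise_cons.mp hpw).2 hz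
    · rw [if_neg hc]
      rw [if_neg hc] at hz
      exact ih m z (fun x hx => hm x (List.mem_cons_of_mem _ hx)) (List.pairwise_cons.mp hpw).2 hz

-- min(ready-triples) = the reference pick, as a triple
lemma pvLexmin_pick (rem arr : List Int) (ready : List Int) (hne : ready ≠ [])
    (hpw : ready.Pairwise (· < ·)) :
    pvE_lexmin (ready.map (pvTrip rem arr)) = some (pvTrip rem arr (pvB_pick rem arr ready)) := by
  match ready with
  | [] => exact absurd rfl hne
  | x :: l =>
    simp only [pvB_pick, pvMin2_eq_foldl, List.foldl_cons]
    have h2 : pvMinStep (fun i => PySem.List.pyGetD rem i 0) (fun i => PySem.List.pyGetD arr i 0) none x = some x := by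
      simp [pvMinStep]
    rw [h2]
    rcases Option.ne_none_iff_exists'.mp
      (pvMinFold_ne_none (fun i => PySem.List.pyGetD rem i 0) (fun i => PySem.List.pyGetD arr i 0) l x) with ⟨z, hz⟩
    rw [hz]
    simp only [pvE_lexmin, List.map_cons, Option.getD_some]
    rw [pvLexAux rem arr l x z (fun w hw => (List.pairwise_cons.mp hpw).1 w hw)
      (List.pairwise_cons.mp hpw).2 hz]

-- pyGetD after a set at a different (nonnegative) index
lemma pvGetD_int_set_ne {al : Type} (xs : List al) (p i : Int) (v d : al)
    (hp0 : 0 ≤ p) (hi0 : 0 ≤ i) (hip : i ≠ p) :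
    PySem.List.pyGetD (xs.set p.toNat v) i d = PySem.List.pyGetD xs i d := by
  rw [pvGetD_int _ _ _ hi0, pvGetD_int _ _ _ hi0]
  exact pvGetD_set_ne _ _ _ _ _ (by omega)

-- removing the finished process from the pending list = flagging it completed
lemma pvPend_remove (n : Int) (arr rem : List Int) (done : List Bool) (p v : Int)
    (hp0 : 0 ≤ p) (hpd : p.toNat < done.length) :
    (pvPendOf n arr rem done).filter (fun q => !(q.2.2 == p))
      = pvPendOf n arr (rem.set p.toNat v) (done.set p.toNat true) := by
  unfold pvPendOf
  rw [List.filter_filterMap]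
  apply List.filterMap_congr
  intro i hi
  have hi0 : 0 ≤ i := ((PySem.List.mem_pyRange_one).mp hi).1
  by_cases hip : i = p
  · subst hip
    have hd' : PySem.List.pyGetD (done.set i.toNat true) i false = true := by
      rw [pvGetD_int _ _ _ hi0]
      exact pvGetD_set_self _ _ _ _ hpd
    rw [hd']
    rcases hd : PySem.List.pyGetD done i false with _ | _
    · simp [Option.filter]
    · simp
  · have hd' := pvGetD_int_set_ne done p i true false hp0 hi0 hip
    have hr' := pvGetD_int_set_ne rem p i v 0 hp0 hi0 hip
    rw [hd', hr']
    rcases hd : PySem.List.pyGetD done i false with _ | _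
    · simp [Option.filter, hip]
    · simp

-- decrementing the running process inside the pending list = updating the remaining array
lemma pvPend_update (n : Int) (arr rem : List Int) (done : List Bool) (p step : Int)
    (hp0 : 0 ≤ p) (hpr : p.toNat < rem.length) :
    (pvPendOf n arr rem done).map (fun q => if q.2.2 == p then (q.1, q.2.1 - step, q.2.2) else q)
      = pvPendOf n arr (rem.set p.toNat (PySem.List.pyGetD rem p 0 - step)) done := by
  unfold pvPendOf
  rw [List.map_filterMap]
  apply List.filterMap_congr
  intro i hi
  have hi0 : 0 ≤ i := ((PySem.List.mem_pyRange_one).mp hi).1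
  rcases hd : PySem.List.pyGetD done i false with _ | _
  · by_cases hip : i = p
    · subst hip
      have hr' : PySem.List.pyGetD (rem.set i.toNat (PySem.List.pyGetD rem i 0 - step)) i 0
          = PySem.List.pyGetD rem i 0 - step := by
        rw [pvGetD_int _ _ _ hi0]
        exact pvGetD_set_self _ _ _ _ hpr
      simp [hd, hr']
    · have hr' := pvGetD_int_set_ne rem p i (PySem.List.pyGetD rem p 0 - step) 0 hp0 hi0 hip
      simp [hd, hr', hip]
  · simp [hd]

-- the ready list of A's indices is index-increasing
lemma pvReady_pw (n : Int) (arr : List Int) (done : List Bool) (t : Int) :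
    (pvA_ready n arr done t).Pairwise (· < ·) :=
  (PySem.List.pairwise_lt_pyRange_one 0 n).filter _

-- one round of B's loop tracks one event of the reference
lemma pvEbody_rel (n : Int) (arr bur : List Int) (s : pvSt) (e : pvEvSt)
    (hInv : pvInv n arr bur s) (hRel : pvRel n arr s e) (hnc : s.ncomp < n) :
    pvRel n arr (pvB_body n arr s) (pvE_body e) := by
  obtain ⟨hpend, ht, hcur, hstart, hrev⟩ := hRel
  have hready : (e.pend.filter (fun p => decide (p.1 ≤ e.t))).map (fun p => (p.2.1, p.1, p.2.2))
      = (pvA_ready n arr s.done s.t).map (pvTrip s.rem arr) := by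
    rw [hpend, ht]
    exact pvPend_proj arr s.rem s.done (fun a => decide (a ≤ s.t)) _ _
  have hfuture : (e.pend.filter (fun p => decide (e.t < p.1))).map (fun p => p.1)
      = pvB_future n arr s.done s.t := by
    rw [hpend, ht]
    exact pvPend_proj arr s.rem s.done (fun a => decide (s.t < a)) _ _
  by_cases hemp : pvA_ready n arr s.done s.t = []
  · -- idle round on both sides
    have hBeq : pvB_body n arr s = { s with
        t := (PySem.List.min? (((PySem.List.pyRange 0 n 1).filter
          (fun i => !(PySem.List.pyGetD s.done i false))).map (fun i => PySem.List.pyGetD arr i 0))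
          (fun x => x)).getD s.t } := by
      unfold pvB_body
      rw [show (PySem.List.pyRange 0 n 1).filter
          (fun i => !(PySem.List.pyGetD s.done i false) && decide (PySem.List.pyGetD arr i 0 ≤ s.t))
          = pvA_ready n arr s.done s.t from rfl, hemp]
      rfl
    have hEeq : pvE_body e = { e with
        t := (PySem.List.min? (e.pend.map (fun p => p.1)) (fun x => x)).getD e.t } := by
      unfold pvE_body
      rw [hready, hemp]
      rfl
    rw [hBeq, hEeq]
    refine ⟨by simpa using hpend, ?_, by simpa using hcur, by simpa using hstart, by simpa using hrev⟩
    simp only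
    rw [hpend, pvPend_fst, ht]
  · -- busy round on both sides
    obtain ⟨hrlen, hdlen, hcount, hrem1, _⟩ := hInv
    obtain ⟨hpmem, _⟩ := pvPick_mem_min s.rem arr _ hemp
    set p := pvB_pick s.rem arr (pvA_ready n arr s.done s.t) with hp
    obtain ⟨hp0, hpn, hpd, hpa⟩ := (pvMem_ready n arr s.done s.t p).mp hpmem
    have hplen : p.toNat < s.rem.length := by omega
    have hpdlen : p.toNat < s.done.length := by omega
    set rp := s.rem.getD p.toNat 0 with hrp
    set dI : Int := if (pvB_future n arr s.done s.t).isEmpty then rp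
        else min rp (((PySem.List.min? (pvB_future n arr s.done s.t) (fun x => x)).getD 0) - s.t) with hd
    have hBend := pvBbody_eq n arr s p rp dI hp hemp hp0 hplen hrp hd
    have hRE : ((pvA_ready n arr s.done s.t).map (pvTrip s.rem arr)).isEmpty = false := by
      cases h : pvA_ready n arr s.done s.t
      · exact absurd h hemp
      · rfl
    have hrp' : PySem.List.pyGetD s.rem p 0 = rp := by rw [pvGetD_int _ _ _ hp0, hrp]
    have hmin := pvLexmin_pick s.rem arr _ hemp (pvReady_pw n arr s.done s.t)
    unfold pvE_body
    rw [hready]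
    simp only [hRE, Bool.false_eq_true, if_false, hmin, Option.getD_some, hfuture, pvTrip]
    rw [← hp, ht, hcur, hstart, hrp', ← hd]
    by_cases hstep : dI = rp
    · rw [if_pos hstep, hBend, if_pos hstep.symm]
      refine ⟨?_, ?_, ?_, ?_, ?_⟩
      · rw [hpend]
        have hpr := pvPend_remove n arr s.rem s.done p (rp - dI) hp0 hpdlen
        simpa [pvFin] using hpr
      · simp [pvFin]
      · simp [pvFin]
      · simp only [pvFin, pvPid, ne_eq]
        rfl
      · simp only [pvFin, pvPid, ne_eq, hrev]
        split_ifs <;> try simp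
        all_goals assumption
    · rw [if_neg hstep, hBend, if_neg (fun h => hstep h.symm)]
      refine ⟨?_, ?_, ?_, ?_, ?_⟩
      · rw [hpend]
        have hpu := pvPend_update n arr s.rem s.done p dI hp0 hplen
        rw [hrp'] at hpu
        simpa [pvMid] using hpu
      · simp [pvMid]
      · simp only [pvMid, pvPid, ne_eq]
        split_ifs with h
        · exact h
        · rfl
      · simp only [pvMid, pvPid, ne_eq]
        rfl
      · simp only [pvMid, pvPid, ne_eq, hrev]
        split_ifs <;> try simp
        all_goals assumption

-- the reference invariant is preserved by one reference event
lemma pvInv_body (n : Int) (arr bur : List Int) (s : pvSt)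
    (hInv : pvInv n arr bur s) (hnc : s.ncomp < n) :
    pvInv n arr bur (pvB_body n arr s) := by
  by_cases hemp : pvA_ready n arr s.done s.t = []
  · obtain ⟨v, _, hB, hInv', _⟩ := pvIdle n arr bur
      ((PySem.List.pyRange 0 n 1).map (fun i => "P" ++ PySem.Int.toStr (i + 1))) s hInv hnc hemp
    rw [hB]
    exact hInv'
  · obtain ⟨_, _, hInv', _, _⟩ := pvBusy n arr bur
      ((PySem.List.pyRange 0 n 1).map (fun i => "P" ++ PySem.Int.toStr (i + 1))) rfl s hInv hnc hemp
    exact hInv'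

-- lockstep: with the same fuel, B's loop tracks the reference loop
lemma pvSim (n : Int) (arr bur : List Int) : ∀ (fuel : Nat) (s : pvSt) (e : pvEvSt),
    pvInv n arr bur s → pvRel n arr s e →
    pvRel n arr (pvB_loop n arr fuel s) (pvE_loop fuel e) := by
  intro fuel
  induction fuel with
  | zero => intro s e _ hRel; exact hRel
  | succ fuel ih =>
    intro s e hInv hRel
    have hpe : e.pend = pvPendOf n arr s.rem s.done := hRel.1
    by_cases hnc : s.ncomp < n
    · have hne : ¬ e.pend.isEmpty = true := by
        rw [List.isEmpty_iff, hpe]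
        exact (pvPend_ne_nil_iff n arr bur s hInv).mpr hnc
      simp only [pvB_loop, pvE_loop, if_pos hnc, if_neg hne]
      exact ih (pvB_body n arr s) (pvE_body e) (pvInv_body n arr bur s hInv hnc)
        (pvEbody_rel n arr bur s e hInv hRel hnc)
    · have hne : e.pend.isEmpty = true := by
        rw [List.isEmpty_iff, hpe]
        by_contra h
        exact hnc ((pvPend_ne_nil_iff n arr bur s hInv).mp h)
      simp only [pvB_loop, pvE_loop, if_neg hnc, if_pos hne]
      exact hRel

-- ===== VERDICT (by name: the statement is the Claim_ definition above) =====
theorem run_srt_scheduler_spec : Claim_equal_run_srt_scheduler := by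
  unfold Claim_equal_run_srt_scheduler
  intro n arr bur _ hPre
  unfold Spec_run_srt_scheduler
  obtain ⟨hane, halen, hblen, hbpos⟩ := hPre
  have hN : n.toNat ≤ bur.length := by omega
  have hInv0 : pvInv n arr bur ⟨bur, List.replicate n.toNat false, 0, "",
      (PySem.List.min? arr (fun x => x)).getD 0, (PySem.List.min? arr (fun x => x)).getD 0, []⟩ := by
    refine ⟨hN, by simp, by simp [List.count_replicate], ?_, Or.inl rfl⟩
    intro i hi hdi
    have hib : i < bur.length := by omega
    have hib2 : i < (bur.take n.toNat).length := by rw [List.length_take]; omega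
    have h1 : 1 ≤ (bur.take n.toNat)[i] := hbpos _ (List.getElem_mem hib2)
    have h2 : (bur.take n.toNat)[i] = bur[i] := by simp
    show 1 ≤ bur.getD i 0
    rw [List.getD_eq_getElem _ _ hib]
    omega
  have hm0 : pvMu n arr ⟨bur, List.replicate n.toNat false, 0, "",
      (PySem.List.min? arr (fun x => x)).getD 0, (PySem.List.min? arr (fun x => x)).getD 0, []⟩
      < (bur.map Int.toNat).sum + n.toNat + 1 := by
    have h1 : ∑ i ∈ Finset.range n.toNat,
        (if (List.replicate n.toNat false).getD i false then 0 else (bur.getD i 0).toNat)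
        ≤ (bur.map Int.toNat).sum := by
      have he : ∀ i ∈ Finset.range n.toNat,
          (if (List.replicate n.toNat false).getD i false then 0 else (bur.getD i 0).toNat)
            = (bur.getD i 0).toNat := by
        intro i hi
        have : (List.replicate n.toNat false).getD i false = false := by
          simp [List.getD_replicate]
        rw [this]
        simp
      rw [Finset.sum_congr rfl he]
      calc ∑ i ∈ Finset.range n.toNat, (bur.getD i 0).toNat
          ≤ ∑ i ∈ Finset.range bur.length, (bur.getD i 0).toNat :=
            Finset.sum_le_sum_of_subset (by intro x hx; rw [Finset.mem_range] at hx ⊢; omega)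
        _ = (bur.map Int.toNat).sum := pvSumGetD bur
    have h2 : ∑ i ∈ Finset.range n.toNat,
        (if (List.replicate n.toNat false).getD i false = false
            ∧ (PySem.List.min? arr (fun x => x)).getD 0 < arr.getD i 0 then (1:ℕ) else 0)
        ≤ n.toNat := by
      calc ∑ i ∈ Finset.range n.toNat,
            (if (List.replicate n.toNat false).getD i false = false
                ∧ (PySem.List.min? arr (fun x => x)).getD 0 < arr.getD i 0 then (1:ℕ) else 0)
          ≤ ∑ _i ∈ Finset.range n.toNat, 1 := Finset.sum_le_sum (fun i _ => by split_ifs <;> omega)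
        _ = n.toNat := by simp
    unfold pvMu
    simp only
    omega
  obtain ⟨heq, hInvF, hncF⟩ := pvMain n arr bur _ rfl
    (pvMu n arr ⟨bur, List.replicate n.toNat false, 0, "",
      (PySem.List.min? arr (fun x => x)).getD 0, (PySem.List.min? arr (fun x => x)).getD 0, []⟩)
    ⟨bur, List.replicate n.toNat false, 0, "",
      (PySem.List.min? arr (fun x => x)).getD 0, (PySem.List.min? arr (fun x => x)).getD 0, []⟩
    ((bur.map Int.toNat).sum + n.toNat + 1) ((bur.map Int.toNat).sum + n.toNat + 1)
    hInv0 le_rfl hm0 hm0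
  have hcurF : (pvB_loop n arr ((bur.map Int.toNat).sum + n.toNat + 1)
      ⟨bur, List.replicate n.toNat false, 0, "",
        (PySem.List.min? arr (fun x => x)).getD 0, (PySem.List.min? arr (fun x => x)).getD 0, []⟩).cur
      = "" := by
    rcases hInvF.2.2.2.2 with h | ⟨q, hq, hqc, hqd, _⟩
    · exact h
    · exfalso
      have hlen := hInvF.2.1
      have hcnt := hInvF.2.2.1
      have hcle : ((pvB_loop n arr ((bur.map Int.toNat).sum + n.toNat + 1)
          ⟨bur, List.replicate n.toNat false, 0, "",
            (PySem.List.min? arr (fun x => x)).getD 0,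
            (PySem.List.min? arr (fun x => x)).getD 0, []⟩).done.count true)
          ≤ (pvB_loop n arr ((bur.map Int.toNat).sum + n.toNat + 1)
          ⟨bur, List.replicate n.toNat false, 0, "",
            (PySem.List.min? arr (fun x => x)).getD 0,
            (PySem.List.min? arr (fun x => x)).getD 0, []⟩).done.length :=
        List.count_le_length
      have hne2 : ((pvB_loop n arr ((bur.map Int.toNat).sum + n.toNat + 1)
          ⟨bur, List.replicate n.toNat false, 0, "",
            (PySem.List.min? arr (fun x => x)).getD 0,
            (PySem.List.min? arr (fun x => x)).getD 0, []⟩).done.count true)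
          ≠ (pvB_loop n arr ((bur.map Int.toNat).sum + n.toNat + 1)
          ⟨bur, List.replicate n.toNat false, 0, "",
            (PySem.List.min? arr (fun x => x)).getD 0,
            (PySem.List.min? arr (fun x => x)).getD 0, []⟩).done.length := by
        intro h
        have hall := List.count_eq_length.mp h
        have hmem : (pvB_loop n arr ((bur.map Int.toNat).sum + n.toNat + 1)
            ⟨bur, List.replicate n.toNat false, 0, "",
              (PySem.List.min? arr (fun x => x)).getD 0,
              (PySem.List.min? arr (fun x => x)).getD 0, []⟩).done.getD q false
            ∈ (pvB_loop n arr ((bur.map Int.toNat).sum + n.toNat + 1)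
            ⟨bur, List.replicate n.toNat false, 0, "",
              (PySem.List.min? arr (fun x => x)).getD 0,
              (PySem.List.min? arr (fun x => x)).getD 0, []⟩).done := by
          rw [List.getD_eq_getElem _ _ (by omega)]
          exact List.getElem_mem _
        have hx := hall _ hmem
        rw [hqd] at hx
        simp at hx
      omega
  have hRel0 : pvRel n arr
      ⟨bur, List.replicate n.toNat false, 0, "",
        (PySem.List.min? arr (fun x => x)).getD 0, (PySem.List.min? arr (fun x => x)).getD 0, []⟩
      ⟨(PySem.List.pyRange 0 n 1).map
          (fun i => (PySem.List.pyGetD arr i 0, PySem.List.pyGetD bur i 0, i)),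
        (PySem.List.min? arr (fun x => x)).getD 0, "",
        (PySem.List.min? arr (fun x => x)).getD 0, []⟩ :=
    ⟨pvPend_init n arr bur, rfl, rfl, rfl, rfl⟩
  have hSim := pvSim n arr bur ((bur.map Int.toNat).sum + n.toNat + 1) _ _ hInv0 hRel0
  unfold run_srt_scheduler run_srt_scheduler_alt
  simp only [heq]
  rw [hSim.2.2.2.2, List.reverse_reverse]
  simp [hcurF]
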